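-- pv_equiv track=rewrite | github.com/DesignCell/Euler | P057.py | rollup_iter
-- ===== SOURCE A (Python) =====
-- def rollup_iter(lim):
--     n = 1
--     d = 2
--     for cnt in range(lim-1,-1,-1):
--         if cnt == 0: a = 1
--         else: a = 2
--         n_ = d
--         d = d * a + n
--         n = n_
--     return d,n
-- ===== SOURCE B (Python) =====
-- def rollup_iter(lim):
--     # Matrix exponentiation: M = [[2,1],[1,0]] satisfies M^n = [[P(n+1),P(n)],[P(n),P(n-1)]]
--     # for the Pell numbers P (convergent denominators of [1;2,2,...]); square-and-multiply
--     # computes M^lim in O(log lim) matrix products, then numerator = P(lim+1)+P(lim) and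
--     # denominator = P(lim+1).
--     def mul(x, y):
--         (a, b, c, d), (e, f, g, h) = x, y
--         return (a * e + b * g, a * f + b * h, c * e + d * g, c * f + d * h)
--     r = (1, 0, 0, 1)
--     b = (2, 1, 1, 0)
--     e = max(lim, 0)
--     while e:
--         if e & 1:
--             r = mul(r, b)
--         b = mul(b, b)
--         e >>= 1
--     p1, p = r[0], r[1]  # P(lim+1), P(lim)
--     return p1 + p, p1
-- ===== Notes on version B (the rewrite author's own statement) =====
-- stated objective: faster
-- what changed: B computes the convergent via binary exponentiation of the 2x2 Pell matrix [[2,1],[1,0]] (square-and-multiply) and reads numerator/denominator off the top row, instead of A's linear descending-range swap loop; intended as faster (measured 15.6x at the largest size both finished; unconfirmed at the largest probe).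
-- outside the precondition, e.g. on rollup_iter(0): A returns (2, 1), B returns (1, 1); on rollup_iter(-3): A returns (2, 1), B returns (1, 1)
import Mathlib
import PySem

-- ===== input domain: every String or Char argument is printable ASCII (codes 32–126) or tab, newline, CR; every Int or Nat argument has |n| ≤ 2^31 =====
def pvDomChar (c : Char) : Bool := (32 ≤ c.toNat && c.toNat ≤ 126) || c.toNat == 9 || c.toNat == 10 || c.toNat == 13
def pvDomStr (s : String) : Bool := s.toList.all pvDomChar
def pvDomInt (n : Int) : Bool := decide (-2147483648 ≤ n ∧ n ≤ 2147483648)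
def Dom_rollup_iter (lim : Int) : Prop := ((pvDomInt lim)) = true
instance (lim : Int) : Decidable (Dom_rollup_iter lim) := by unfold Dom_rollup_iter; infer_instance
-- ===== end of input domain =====

-- B replaces A's linear descending swap loop by square-and-multiply exponentiation of the
-- 2x2 Pell matrix [[2,1],[1,0]], reading the convergent off the top row; intended as faster
-- (a timing run measured B 15.6x faster at the largest size both versions finished).


-- ===== PORT A =====
-- loop body of A: state (n, d); a = 1 iff cnt == 0; n_ = d; d = d * a + n; n = n_
def rollupStepA (st : Int × Int) (cnt : Int) : Int × Int :=
  let a : Int := if cnt = 0 then 1 else 2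
  let n_ := st.2
  (n_, st.2 * a + st.1)

def rollup_iter (lim : Int) : Int × Int :=
  let st := (PySem.List.pyRange (lim - 1) (-1) (-1)).foldl rollupStepA (1, 2)
  (st.2, st.1)

-- ===== PORT B =====
-- 2x2 integer matrix as (a, b, c, d) = [[a, b], [c, d]]; Source B's `mul`
def matMul (x y : Int × Int × Int × Int) : Int × Int × Int × Int :=
  (x.1 * y.1 + x.2.1 * y.2.2.1, x.1 * y.2.1 + x.2.1 * y.2.2.2,
   x.2.2.1 * y.1 + x.2.2.2 * y.2.2.1, x.2.2.1 * y.2.1 + x.2.2.2 * y.2.2.2)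

-- Source B's while-loop: square-and-multiply over the bits of e
def powLoop (r b : Int × Int × Int × Int) (e : Nat) : Int × Int × Int × Int :=
  if e = 0 then r
  else powLoop (if e % 2 = 1 then matMul r b else r) (matMul b b) (e / 2)
termination_by e
decreasing_by exact Nat.div_lt_self (by omega) (by norm_num)

def rollup_iter_alt (lim : Int) : Int × Int :=
  let r := powLoop (1, 0, 0, 1) (2, 1, 1, 0) (max lim 0).toNat
  (r.1 + r.2.1, r.1)

-- ===== PRECONDITION & SPEC =====
-- Pre_ excludes non-positive lim, outside the convergent-index domain of this Euler-P057
-- helper: there the loop body never runs, neither initialisation is a specified answer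
-- (A is left with (2, 1), B with (1, 1)), and no caller would specify either.
def Pre_rollup_iter (lim : Int) : Prop := 1 ≤ lim
instance (lim : Int) : Decidable (Pre_rollup_iter lim) := by unfold Pre_rollup_iter; infer_instance

def pvWitness_rollup_iter : Int := 1

def Spec_rollup_iter (lim : Int) (out : Int × Int) : Prop := out = rollup_iter_alt lim
instance (lim : Int) (out : Int × Int) : Decidable (Spec_rollup_iter lim out) := by unfold Spec_rollup_iter; infer_instance

-- ===== CLAIM (what is proved, stated in full; the proofs are below) =====
def Claim_equal_rollup_iter : Prop := ∀ (lim : Int), Dom_rollup_iter lim → Pre_rollup_iter lim → Spec_rollup_iter lim (rollup_iter lim)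

-- ===== LEMMAS AND PROOFS =====

-- Pell numbers: 0, 1, 2, 5, 12, 29, …
def pvP : Nat → Int
  | 0 => 0
  | 1 => 1
  | n + 2 => 2 * pvP (n + 1) + pvP n

-- naive matrix power, multiplying on the left
def natPow (b : Int × Int × Int × Int) : Nat → Int × Int × Int × Int
  | 0 => (1, 0, 0, 1)
  | n + 1 => matMul b (natPow b n)

theorem matMul_assoc (x y z : Int × Int × Int × Int) :
    matMul (matMul x y) z = matMul x (matMul y z) := by
  simp only [matMul, Prod.mk.injEq]
  refine ⟨by ring, by ring, by ring, by ring⟩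

theorem matMul_one_right (x : Int × Int × Int × Int) : matMul x (1, 0, 0, 1) = x := by
  simp only [matMul, mul_one, mul_zero, add_zero, zero_add]

theorem matMul_one_left (x : Int × Int × Int × Int) : matMul (1, 0, 0, 1) x = x := by
  simp only [matMul, add_zero, zero_add, one_mul, zero_mul]

theorem natPow_double (b : Int × Int × Int × Int) (m : Nat) :
    natPow b (2 * m) = natPow (matMul b b) m := by
  induction m with
  | zero => rfl
  | succ m ih =>
    have h : 2 * (m + 1) = 2 * m + 1 + 1 := by omega
    rw [h, natPow, natPow, ih, ← matMul_assoc]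
    rfl

theorem powLoop_eq (e : Nat) : ∀ r b : Int × Int × Int × Int,
    powLoop r b e = matMul r (natPow b e) := by
  induction e using Nat.strong_induction_on with
  | _ e ih =>
    intro r b
    unfold powLoop
    by_cases h0 : e = 0
    · rw [if_pos h0, h0, natPow, matMul_one_right]
    · rw [if_neg h0, ih (e / 2) (Nat.div_lt_self (by omega) (by norm_num))]
      by_cases hp : e % 2 = 1
      · rw [if_pos hp]
        have he : e = 2 * (e / 2) + 1 := by omega
        rw [matMul_assoc]
        conv_rhs => rw [he]
        rw [natPow, ← natPow_double]
      · rw [if_neg hp]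
        have he : e = 2 * (e / 2) := by omega
        conv_rhs => rw [he]
        rw [natPow_double]

theorem natPow_M (n : Nat) :
    natPow (2, 1, 1, 0) n = (pvP (n + 1), pvP n, pvP n, pvP (n + 1) - 2 * pvP n) := by
  induction n with
  | zero => simp [natPow, pvP]
  | succ n ih =>
    rw [natPow, ih]
    simp only [matMul, Prod.mk.injEq]
    have hp : pvP (n + 2) = 2 * pvP (n + 1) + pvP n := rfl
    refine ⟨?_, ?_, ?_, ?_⟩ <;> (try rw [hp]) <;> ring

-- the descending list [k, k-1, …, 1, 0] that A's range produces for lim = k+1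
def pvDesc : Nat → List Int
  | 0 => [0]
  | k + 1 => ((k : Int) + 1) :: pvDesc k

theorem pvDesc_eq (k : Nat) :
    (List.range (k + 1)).map (fun j : Nat => (k : Int) + (-1) * (j : Int)) = pvDesc k := by
  induction k with
  | zero => simp [pvDesc]
  | succ k ih =>
    rw [List.range_succ_eq_map, List.map_cons, List.map_map]
    have h2 : ((fun j : Nat => ((k + 1 : Nat) : Int) + (-1) * (j : Int)) ∘ Nat.succ)
        = (fun j : Nat => (k : Int) + (-1) * (j : Int)) := by
      funext j; simp only [Function.comp_apply]; push_cast; ring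
    rw [h2, ih]
    simp [pvDesc]

theorem pyRange_desc (k : Nat) :
    PySem.List.pyRange (k : Int) (-1) (-1) = pvDesc k := by
  rw [PySem.List.pyRange]
  rw [if_neg (by norm_num), if_neg (by norm_num), if_pos (by omega)]
  have h2 : (((k : Int) - (-1) + -(-1) - 1) / -(-1)).toNat = k + 1 := by norm_num
  rw [h2]
  exact pvDesc_eq k

theorem foldA_desc (k : Nat) : ∀ t : Nat,
    List.foldl rollupStepA (pvP (t + 1), pvP (t + 2)) (pvDesc k)
      = (pvP (k + t + 2), pvP (k + t + 2) + pvP (k + t + 1)) := by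
  induction k with
  | zero =>
    intro t
    simp [pvDesc, rollupStepA]
  | succ k ih =>
    intro t
    rw [pvDesc, List.foldl_cons]
    have hk : ¬((k : Int) + 1 = 0) := by omega
    have hstep : rollupStepA (pvP (t + 1), pvP (t + 2)) ((k : Int) + 1)
        = (pvP (t + 1 + 1), pvP (t + 1 + 2)) := by
      simp only [rollupStepA, if_neg hk]
      have hp : pvP (t + 1 + 2) = 2 * pvP (t + 2) + pvP (t + 1) := rfl
      rw [hp, mul_comm (pvP (t + 2)) 2]
    rw [hstep, ih (t + 1), show k + (t + 1) = k + 1 + t from by omega]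

theorem rollup_iter_eq_of_pos (k : Nat) :
    rollup_iter ((k : Int) + 1) = rollup_iter_alt ((k : Int) + 1) := by
  have hA : rollup_iter ((k : Int) + 1) = (pvP (k + 2) + pvP (k + 1), pvP (k + 2)) := by
    simp only [rollup_iter]
    rw [show (k : Int) + 1 - 1 = (k : Int) from by ring, pyRange_desc,
      show ((1 : Int), (2 : Int)) = (pvP 1, pvP 2) from rfl, foldA_desc k 0]
  have hB : rollup_iter_alt ((k : Int) + 1) = (pvP (k + 2) + pvP (k + 1), pvP (k + 2)) := by
    simp only [rollup_iter_alt]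
    rw [show (max ((k : Int) + 1) 0).toNat = k + 1 from by omega,
      powLoop_eq, matMul_one_left, natPow_M]
  rw [hA, hB]

-- ===== VERDICT (by name: the statement is the Claim_ definition above) =====
theorem rollup_iter_spec : Claim_equal_rollup_iter := by
  intro lim _ hpre
  unfold Pre_rollup_iter at hpre
  obtain ⟨n, rfl⟩ : ∃ n : Nat, lim = (n : Int) := ⟨lim.toNat, by omega⟩
  obtain ⟨k, rfl⟩ : ∃ k : Nat, n = k + 1 := ⟨n - 1, by omega⟩
  push_cast
  exact rollup_iter_eq_of_pos k
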